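-- pv_equiv track=rewrite | github.com/saribekyan/rau-independence-cup-2019 | problems/D-quiz/sol.py | solution
-- ===== SOURCE A (Python) =====
-- def solution(S):
--     n = len(S)
--     ans = 0
--     ans = [ ]
--     if n > 3:
--         if S[0] == '?':
--             ans.append('1')
--         else:
--             ans.append(S[0])
--         for x in S[1 : n - 3]:
--             if x == '?':
--                 ans.append('0')
--             else:
--                 ans.append(x)
--
--         S = S[-3:]
--
--     ok = False
--     for i in range(0, 1000, 8):
--         s = str(i)
--         if n <= 3 and (i == 0 or len(s) != len(S)):
--             continue
--
--         while len(s) < len(S):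
--             s = '0' + s
--         ok = True
--         for j in range(len(S)):
--             if S[j] != '?' and S[j] != s[j]:
--                 ok = False
--         if ok:
--             return ''.join(ans) + s
--
--     if not ok:
--         return '-1'
-- ===== SOURCE B (Python) =====
-- def _fills(p):
--     # all digit strings matching pattern p (digits fixed, '?' free), in increasing numeric order
--     out = ['']
--     for ch in p:
--         digs = '0123456789' if ch == '?' else (ch if ch.isdigit() else '')
--         out = [s + d for s in out for d in digs]
--     return out
--
--
-- def solution(S):
--     n = len(S)
--     if n > 3:
--         prefix = ('1' if S[0] == '?' else S[0]) + \
--             ''.join('0' if c == '?' else c for c in S[1:n - 3])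
--         for t in _fills(S[-3:]):
--             if int(t) % 8 == 0:
--                 return prefix + t
--         return '-1'
--     for t in _fills(S):
--         if t and t[0] != '0' and int(t) % 8 == 0:
--             return t
--     return '-1'
-- ===== Notes on version B (the rewrite author's own statement) =====
-- stated objective: alternative
-- what changed: A scans the multiples of 8 (range(0,1000,8)) and tests each padded decimal string against the pattern; B instead enumerates the digit strings matching the pattern (filling each '?' with 0-9 in increasing order) and returns the first one divisible by 8.
import Mathlib
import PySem

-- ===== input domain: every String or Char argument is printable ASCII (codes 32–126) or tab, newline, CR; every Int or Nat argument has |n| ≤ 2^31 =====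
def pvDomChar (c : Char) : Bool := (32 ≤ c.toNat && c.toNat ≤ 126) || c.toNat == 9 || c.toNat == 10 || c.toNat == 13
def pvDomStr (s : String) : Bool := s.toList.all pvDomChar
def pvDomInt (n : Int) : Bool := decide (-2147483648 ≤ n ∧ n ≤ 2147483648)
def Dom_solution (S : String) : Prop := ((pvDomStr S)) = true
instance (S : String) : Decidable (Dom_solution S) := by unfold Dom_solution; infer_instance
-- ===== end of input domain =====

-- B replaces A's scan over multiples of 8 by enumerating the digit strings matching the
-- pattern in increasing order and returning the first divisible by 8 (objective: alternative).

-- ===== PORT A =====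
-- while len(s) < L: s = '0' + s   (structural recursion on the number of missing chars)
def padLoop : Nat → List Char → List Char
  | 0, s => s
  | k+1, s => padLoop k ('0' :: s)

def padZeros (L : Nat) (s : List Char) : List Char := padLoop (L - s.length) s

-- ok = True; for j in range(len(S)): if S[j] != '?' and S[j] != s[j]: ok = False
def checkA (T s : List Char) : Bool :=
  (PySem.List.pyRange 0 (PySem.List.len T) 1).foldl
    (fun ok j =>
      if PySem.List.pyGetD T j ' ' != '?' && PySem.List.pyGetD T j ' ' != PySem.List.pyGetD s j ' '
      then false else ok)
    true

-- the main 'for i in range(0, 1000, 8)' loop; falls off the end with ok = False (Python then returns '-1')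
def loopA (T : List Char) (n : Int) : List Int → Option (List Char)
  | [] => none
  | i :: is =>
    let s := PySem.Int.toChars i
    if n ≤ 3 ∧ (i = 0 ∨ ((s.length : Int) ≠ PySem.List.len T)) then loopA T n is
    else
      let s := padZeros T.length s
      if checkA T s then some s else loopA T n is

def solution (S : String) : String :=
  let n : Int := PySem.Str.len S
  let ansS : List Char × List Char :=
    if 3 < n then
      let a0 : List Char :=
        [if PySem.List.pyGetD S.toList 0 ' ' = '?' then '1' else PySem.List.pyGetD S.toList 0 ' ']
      let ans := (PySem.List.slice S.toList (some 1) (some (n - 3))).foldl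
        (fun acc x => acc ++ [if x = '?' then '0' else x]) a0
      (ans, PySem.List.slice S.toList (some (-3)) none)
    else ([], S.toList)
  match loopA ansS.2 n (PySem.List.pyRange 0 1000 8) with
  | some s => String.ofList (ansS.1 ++ s)
  | none => "-1"

-- ===== PORT B =====
def pyDigits : List Char := ['0','1','2','3','4','5','6','7','8','9']

-- digs = '0123456789' if ch == '?' else (ch if ch.isdigit() else '')
def fillDigits (c : Char) : List Char :=
  if c = '?' then pyDigits else if PySem.Chars.isdigit c then [c] else []

-- out = [s + d for s in out for d in digs], folded over the pattern
def fillsGo : List Char → List (List Char) → List (List Char)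
  | [], out => out
  | c :: p, out => fillsGo p (out.flatMap (fun s => (fillDigits c).map (fun d => s ++ [d])))

def fills (p : List Char) : List (List Char) := fillsGo p [[]]

-- int(t) % 8 == 0   (t is a nonempty digit string wherever this is evaluated)
def val8 (t : List Char) : Bool := PySem.Int.mod ((PySem.Int.ofChars? t).getD 0) 8 == 0

-- t and t[0] != '0' and int(t) % 8 == 0
def predB (t : List Char) : Bool :=
  match t with
  | [] => false
  | c :: _ => c != '0' && val8 t

def solution_alt (S : String) : String :=
  let n : Nat := S.toList.length
  if 3 < n then
    let pre : List Char :=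
      (if PySem.List.pyGetD S.toList 0 ' ' = '?' then '1' else PySem.List.pyGetD S.toList 0 ' ') ::
        (PySem.List.slice S.toList (some 1) (some ((n : Int) - 3))).map (fun c => if c = '?' then '0' else c)
    match (fills (PySem.List.slice S.toList (some (-3)) none)).find? val8 with
    | some t => String.ofList (pre ++ t)
    | none => "-1"
  else
    match (fills S.toList).find? predB with
    | some t => String.ofList t
    | none => "-1"

-- ===== PRECONDITION & SPEC =====
def Spec_solution (S : String) (out : String) : Prop := out = solution_alt S
instance (S : String) (out : String) : Decidable (Spec_solution S out) := by unfold Spec_solution; infer_instance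

-- ===== CLAIM (what is proved, stated in full; the proofs are below) =====
def Claim_equal_solution : Prop := ∀ (S : String), Dom_solution S → Spec_solution S (solution S)

-- ===== LEMMAS AND PROOFS =====

-- the full product space: prodF p lists the digit strings matching pattern p in increasing order
def prodF : List Char → List (List Char)
  | [] => [[]]
  | c :: p => (fillDigits c).flatMap (fun d => (prodF p).map (d :: ·))

-- pointwise pattern match (recursion on both lists)
def matchB : List Char → List Char → Bool
  | [], [] => true
  | c :: p, d :: s => (c == '?' || c == d) && matchB p s
  | _, _ => false

theorem find?_congr_mem {α : Type} {l : List α} {p q : α → Bool}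
    (h : ∀ x ∈ l, p x = q x) : l.find? p = l.find? q := by
  induction l with
  | nil => rfl
  | cons a l ih =>
    simp only [List.find?_cons]
    rw [h a (by simp)]
    cases q a <;> simp [ih (fun x hx => h x (by simp [hx]))]

theorem flatMap_if_filter {α β : Type} (l : List α) (q : α → Bool) (g : α → List β) :
    l.flatMap (fun d => if q d then g d else []) = (l.filter q).flatMap g := by
  induction l with
  | nil => rfl
  | cons a l ih => by_cases h : q a <;> simp [h, ih]

theorem fillsGo_eq (p : List Char) : ∀ out,
    fillsGo p out = out.flatMap (fun s => (prodF p).map (s ++ ·)) := by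
  induction p with
  | nil => intro out; simp [fillsGo, prodF]
  | cons c p ih =>
    intro out
    simp only [fillsGo, prodF, ih]
    simp [List.flatMap_map, List.map_flatMap, List.flatMap_assoc, List.map_map, Function.comp_def]

theorem fills_eq_prodF (p : List Char) : fills p = prodF p := by
  simp [fills, fillsGo_eq]

theorem length_of_mem_prodF : ∀ (p : List Char) (x : List Char), x ∈ prodF p → x.length = p.length := by
  intro p
  induction p with
  | nil => simp [prodF]
  | cons c p ih =>
    intro x hx
    simp only [prodF, List.mem_flatMap, List.mem_map] at hx
    obtain ⟨d, -, y, hy, rfl⟩ := hx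
    simp [ih y hy]

theorem isdigit_iff_mem (c : Char) : PySem.Chars.isdigit c = true ↔ c ∈ pyDigits := by
  constructor
  · intro h
    simp only [PySem.Chars.isdigit, Bool.and_eq_true, decide_eq_true_eq] at h
    have h1 : 48 ≤ c.toNat := h.1
    have h2 : c.toNat ≤ 57 := h.2
    have : c.toNat = 48 ∨ c.toNat = 49 ∨ c.toNat = 50 ∨ c.toNat = 51 ∨ c.toNat = 52 ∨
        c.toNat = 53 ∨ c.toNat = 54 ∨ c.toNat = 55 ∨ c.toNat = 56 ∨ c.toNat = 57 := by omega
    rcases this with h|h|h|h|h|h|h|h|h|h <;>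
      · rw [show c = Char.ofNat c.toNat from (Char.ofNat_toNat c).symm, h]; decide
  · intro h
    fin_cases h <;> decide

theorem filter_digits (c : Char) :
    pyDigits.filter (fun d => c == '?' || c == d) = fillDigits c := by
  by_cases hq : c = '?'
  · subst hq; decide
  · by_cases hd : PySem.Chars.isdigit c = true
    · have hm := (isdigit_iff_mem c).mp hd
      simp only [fillDigits, if_neg hq, if_pos hd]
      fin_cases hm <;> simp_all <;> decide
    · have : ∀ d ∈ pyDigits, ¬((c == '?' || c == d) = true) := by
        intro d hdm
        simp only [Bool.or_eq_true, beq_iff_eq]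
        rintro (rfl | rfl)
        · exact hq rfl
        · exact hd ((isdigit_iff_mem c).mpr hdm)
      rw [List.filter_eq_nil_iff.mpr this]
      simp [fillDigits, hq, hd]

theorem prodF_eq_filter : ∀ (p : List Char),
    (prodF (List.replicate p.length '?')).filter (matchB p) = prodF p := by
  intro p
  induction p with
  | nil => decide
  | cons c p ih =>
    simp only [List.length_cons, List.replicate_succ, prodF]
    rw [List.filter_flatMap]
    have step : ∀ d ∈ fillDigits '?',
        ((prodF (List.replicate p.length '?')).map (d :: ·)).filter (matchB (c :: p))
          = if (c == '?' || c == d) then (prodF p).map (d :: ·) else [] := by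
      intro d _
      rw [List.filter_map]
      by_cases h : (c == '?' || c == d) = true
      · simp only [if_pos h]
        rw [← ih]
        congr 1
        apply List.filter_congr
        intro x _
        simp [matchB, h]
      · simp only [if_neg h]
        have : (prodF (List.replicate p.length '?')).filter ((matchB (c :: p)) ∘ (d :: ·)) = [] := by
          apply List.filter_eq_nil_iff.mpr
          intro x _
          simp only [Function.comp_def, matchB]
          simp only [Bool.not_eq_true] at h ⊢
          simp [h]
        rw [this, List.map_nil]
    calc (fillDigits '?').flatMap
          (fun d => ((prodF (List.replicate p.length '?')).map (d :: ·)).filter (matchB (c :: p)))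
        = (fillDigits '?').flatMap
          (fun d => if (c == '?' || c == d) then (prodF p).map (d :: ·) else []) := by
          exact List.flatMap_congr (fun d hd => step d hd)
      _ = ((fillDigits '?').filter (fun d => c == '?' || c == d)).flatMap
          (fun d => (prodF p).map (d :: ·)) := flatMap_if_filter _ _ _
      _ = (fillDigits c).flatMap (fun d => (prodF p).map (d :: ·)) := by
          rw [show fillDigits '?' = pyDigits from rfl, filter_digits]

theorem checkA_eq_any (T s : List Char) :
    checkA T s = !((List.range T.length).any
      (fun k => T.getD k ' ' != '?' && T.getD k ' ' != s.getD k ' ')) := by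
  simp only [checkA, PySem.List.len_eq]
  rw [PySem.List.foldl_if_false_eq]
  rw [PySem.List.pyRange_zero_nat, List.any_map]
  simp [Function.comp_def, List.getD_eq_getElem?_getD]

theorem matchB_eq_not_any : ∀ (T s : List Char), s.length = T.length →
    matchB T s = !((List.range T.length).any
      (fun k => T.getD k ' ' != '?' && T.getD k ' ' != s.getD k ' ')) := by
  intro T
  induction T with
  | nil =>
    intro s hs
    rw [List.length_eq_zero_iff.mp hs]
    decide
  | cons c T ih =>
    intro s hs
    match s, hs with
    | d :: s, hs =>
      have hs' : s.length = T.length := by simpa using hs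
      have hb : (c != '?' && c != d) = !(c == '?' || c == d) := by
        cases h1 : c == '?' <;> cases h2 : c == d <;>
          simp_all [bne]
      simp only [List.length_cons, List.range_succ_eq_map, List.any_cons, List.any_map]
      have hshift : ((List.range T.length).any
            ((fun k => (c :: T).getD k ' ' != '?' &&
              (c :: T).getD k ' ' != (d :: s).getD k ' ') ∘ Nat.succ))
          = (List.range T.length).any
            (fun k => T.getD k ' ' != '?' && T.getD k ' ' != s.getD k ' ') := by
        apply List.any_congr rfl
        intro k
        simp
      rw [hshift]
      simp only [matchB, List.getD_cons_zero, ih s hs', hb]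
      cases hcb : (c == '?' || c == d) <;>
        cases ha : (List.range T.length).any
          (fun k => T.getD k ' ' != '?' && T.getD k ' ' != s.getD k ' ') <;> simp

theorem checkA_eq_matchB (T s : List Char) (h : s.length = T.length) :
    checkA T s = matchB T s := by
  rw [checkA_eq_any, matchB_eq_not_any T s h]

theorem loopA_eq (T : List Char) (n : Int) : ∀ is : List Int,
    loopA T n is = ((is.filterMap (fun i =>
      if n ≤ 3 ∧ (i = 0 ∨ (((PySem.Int.toChars i).length : Int) ≠ PySem.List.len T)) then none
      else some (padZeros T.length (PySem.Int.toChars i)))).find? (checkA T)) := by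
  intro is
  induction is with
  | nil => rfl
  | cons i is ih =>
    by_cases hg : n ≤ 3 ∧ (i = 0 ∨ (((PySem.Int.toChars i).length : Int) ≠ PySem.List.len T))
    · simp only [loopA, if_pos hg, List.filterMap_cons]
      exact ih
    · simp only [loopA, if_neg hg, List.filterMap_cons, List.find?_cons]
      cases hc : checkA T (padZeros T.length (PySem.Int.toChars i)) <;> simp [ih]

-- the concrete candidate lists (n > 3 tail, and full strings of length 1, 2, 3)
set_option maxRecDepth 40000 in
theorem listA_tail :
    (PySem.List.pyRange 0 1000 8).map (fun i => padZeros 3 (PySem.Int.toChars i))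
      = (prodF (List.replicate 3 '?')).filter val8 := by decide

set_option maxRecDepth 40000 in
theorem listA_len1 :
    ((PySem.List.pyRange 0 1000 8).filterMap (fun i =>
      if i = 0 ∨ (((PySem.Int.toChars i).length : Int) ≠ 1) then none
      else some (padZeros 1 (PySem.Int.toChars i))))
      = (prodF (List.replicate 1 '?')).filter predB := by decide

set_option maxRecDepth 40000 in
theorem listA_len2 :
    ((PySem.List.pyRange 0 1000 8).filterMap (fun i =>
      if i = 0 ∨ (((PySem.Int.toChars i).length : Int) ≠ 2) then none
      else some (padZeros 2 (PySem.Int.toChars i))))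
      = (prodF (List.replicate 2 '?')).filter predB := by decide

set_option maxRecDepth 40000 in
theorem listA_len3 :
    ((PySem.List.pyRange 0 1000 8).filterMap (fun i =>
      if i = 0 ∨ (((PySem.Int.toChars i).length : Int) ≠ 3) then none
      else some (padZeros 3 (PySem.Int.toChars i))))
      = (prodF (List.replicate 3 '?')).filter predB := by decide

-- find? with the two filters swapped: both sides over the full product space
theorem find?_swap (l : List Char) (q : List Char → Bool) :
    ((prodF (List.replicate l.length '?')).filter q).find? (checkA l)
      = (prodF l).find? q := by
  rw [List.find?_filter]
  rw [← prodF_eq_filter l, List.find?_filter]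
  apply find?_congr_mem
  intro x hx
  have hxl : x.length = l.length := by
    simpa using length_of_mem_prodF _ x hx
  rw [checkA_eq_matchB l x hxl]
  simp [and_comm]

theorem find?_swap' (l : List Char) (k : Nat) (hk : l.length = k) (q : List Char → Bool) :
    ((prodF (List.replicate k '?')).filter q).find? (checkA l)
      = (prodF l).find? q := by
  subst hk; exact find?_swap l q

-- ===== VERDICT (by name: the statement is the Claim_ definition above) =====
theorem solution_spec : Claim_equal_solution := by
  intro S _
  unfold Spec_solution
  show solution S = solution_alt S
  simp only [solution, solution_alt, PySem.Str.len_eq]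
  generalize S.toList = l
  by_cases h3 : 3 < l.length
  · -- n > 3 : prefix + last-3-digit search
    have h3' : (3 : Int) < (l.length : Int) := by exact_mod_cast h3
    rw [if_pos h3', if_pos h3]
    rw [PySem.List.slice_from_neg_ofNat l 3 (by omega)]
    have hT : (l.drop (l.length - 3)).length = 3 := by
      simp; omega
    have hn : ¬ ((l.length : Int) ≤ 3) := by exact_mod_cast not_le.mpr h3
    rw [loopA_eq]
    simp only [hn, false_and, if_false, PySem.List.foldl_append_singleton_eq_map]
    rw [show (List.filterMap (fun i =>
        some (padZeros (l.drop (l.length - 3)).length (PySem.Int.toChars i)))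
        (PySem.List.pyRange 0 1000 8))
      = (PySem.List.pyRange 0 1000 8).map
          (fun i => padZeros (l.drop (l.length - 3)).length (PySem.Int.toChars i)) from by simp]
    rw [hT, listA_tail, find?_swap' _ 3 hT, fills_eq_prodF]
    cases (prodF (l.drop (l.length - 3))).find? val8 <;> simp
  · -- n ≤ 3 : full-length search
    have h3' : ¬ ((3 : Int) < (l.length : Int)) := by exact_mod_cast h3
    have hn : (l.length : Int) ≤ 3 := by exact_mod_cast not_lt.mp h3
    rw [if_neg h3', if_neg h3]
    rw [loopA_eq]
    simp only [hn, true_and, PySem.List.len_eq]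
    match l, h3 with
    | [], _ => decide
    | [a], _ =>
      simp only [List.length_cons, List.length_nil, Nat.zero_add, Nat.cast_one]
      rw [listA_len1, find?_swap' [a] 1 rfl, fills_eq_prodF]
      cases (prodF [a]).find? predB <;> simp
    | [a, b], _ =>
      simp only [List.length_cons, List.length_nil, Nat.zero_add, Nat.reduceAdd, Nat.cast_ofNat]
      rw [listA_len2, find?_swap' [a, b] 2 rfl, fills_eq_prodF]
      cases (prodF [a, b]).find? predB <;> simp
    | [a, b, c], _ =>
      simp only [List.length_cons, List.length_nil, Nat.zero_add, Nat.reduceAdd, Nat.cast_ofNat]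
      rw [listA_len3, find?_swap' [a, b, c] 3 rfl, fills_eq_prodF]
      cases (prodF [a, b, c]).find? predB <;> simp
    | _ :: _ :: _ :: _ :: _, h => simp at h
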